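-- pv_equiv track=rewrite | github.com/hanochk/llm_scene_graph_creation_by_caption | nebula3_experiments/prompts_utils.py | limit_paragrapgs_by_prompt_size_pred_delta_anderson
-- ===== SOURCE A (Python) =====
-- margin_for_prompt_suffix = 512
--
-- def limit_paragrapgs_by_prompt_size_pred_delta_anderson(paragraphs, prompt_limit=4096, max_query=50):
--
--     in_context_ex_limit = prompt_limit - margin_for_prompt_suffix - max_query*2 # margin_for_prompt_suffix=512  max_query*2 : for prompt and anderson reference
--     in_context_ex = list()
--     # in_context_ex_paragraph = list()
--     overhead_to_sent = 0
--     len_of_paragraph = len('paragraph') + 1 # +1 for the \n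
--     len_of_tuples = len('Corrected tuples:') + 1 + len('Reference tuples:') + 1
--
--
--     for ix, paragraph in enumerate(paragraphs):
--         overhead_to_sent += 2*(len(paragraph.split('.')) -1) * (len_of_paragraph + len_of_tuples)
--         if 0:
--             triplets = spice_get_triplets(paragraph)
--         else: # dummy triplet
--             triplets = paragraph
--
--         dummy_triplets = triplets
--         in_context_ex.append('\nParagraph: {}'.format(paragraph) + '\nReference tuples: {}'.format(triplets) + '\nCorrected tuples:{}'.format(dummy_triplets)) #    Paragraph: {}     Reference tuples: {}     Corrected tuples:'''
--         # in_context_ex_paragraph.append(paragraph)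
--         temp_prompt = ''.join(in_context_ex)
--         if len(temp_prompt) + overhead_to_sent>in_context_ex_limit:
--             return ix + 1 # no of paragraph sentetnces
-- ===== SOURCE B (Python) =====
-- margin_for_prompt_suffix = 512
--
-- def limit_paragrapgs_by_prompt_size_pred_delta_anderson(paragraphs, prompt_limit=4096, max_query=50):
--     # Running total of a closed-form per-paragraph delta: 49 + 3*len(p) for its
--     # in-context example text plus 92*(len(p.split('.')) - 1) per-sentence overhead,
--     # instead of rebuilding and re-joining the example list each iteration.
--     limit = prompt_limit - margin_for_prompt_suffix - max_query * 2
--     total = 0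
--     for i, p in enumerate(paragraphs, 1):
--         total += 49 + 3 * len(p) + 92 * (len(p.split('.')) - 1)
--         if total > limit:
--             return i
--     return None
-- ===== Notes on version B (the rewrite author's own statement) =====
-- stated objective: simpler
-- what changed: Replaces A's growing example list that is re-joined and re-measured on every iteration with a single running prefix sum of a closed-form per-paragraph delta (49 + 3*len(p) + 92*(len(p.split('.'))-1)).
import Mathlib
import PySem

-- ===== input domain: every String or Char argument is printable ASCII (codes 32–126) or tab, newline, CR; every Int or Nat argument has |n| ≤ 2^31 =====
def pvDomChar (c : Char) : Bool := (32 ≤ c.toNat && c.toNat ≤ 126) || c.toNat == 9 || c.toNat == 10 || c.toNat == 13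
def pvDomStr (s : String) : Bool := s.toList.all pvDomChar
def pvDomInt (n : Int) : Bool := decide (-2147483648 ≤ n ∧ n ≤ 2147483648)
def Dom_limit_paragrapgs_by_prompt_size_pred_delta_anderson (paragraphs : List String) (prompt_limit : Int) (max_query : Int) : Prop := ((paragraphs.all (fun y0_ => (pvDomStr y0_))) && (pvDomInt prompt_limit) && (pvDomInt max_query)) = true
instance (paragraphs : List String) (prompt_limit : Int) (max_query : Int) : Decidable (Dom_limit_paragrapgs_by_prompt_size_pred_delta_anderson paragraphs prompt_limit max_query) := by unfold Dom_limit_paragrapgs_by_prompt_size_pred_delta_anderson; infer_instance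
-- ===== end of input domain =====

-- B replaces A's "rebuild and re-join the whole example list each iteration" with a single
-- running prefix sum of a closed-form per-paragraph delta (objective: simpler).
-- ===== PORT A =====
-- the for-loop of A: state = (ix, in_context_ex, overhead_to_sent)
def pvA_loop (in_context_ex_limit len_of_paragraph len_of_tuples : Int)
    (ps : List String) (ix : Int) (in_context_ex : List String) (overhead_to_sent : Int) : Option Int :=
  match ps with
  | [] => none
  | paragraph :: rest =>
    let overhead_to_sent := overhead_to_sent +
      2 * (((PySem.Chars.splitOn paragraph.toList ".".toList).length : Int) - 1) *
        (len_of_paragraph + len_of_tuples)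
    let triplets := paragraph       -- dummy triplet branch
    let dummy_triplets := triplets
    let in_context_ex := in_context_ex ++
      ["\nParagraph: " ++ paragraph ++ "\nReference tuples: " ++ triplets ++
        "\nCorrected tuples:" ++ dummy_triplets]
    let temp_prompt := PySem.Str.join "" in_context_ex
    if PySem.Str.len temp_prompt + overhead_to_sent > in_context_ex_limit then some (ix + 1)
    else pvA_loop in_context_ex_limit len_of_paragraph len_of_tuples rest (ix + 1) in_context_ex overhead_to_sent

def limit_paragrapgs_by_prompt_size_pred_delta_anderson (paragraphs : List String) (prompt_limit : Int) (max_query : Int) : Option Int :=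
  let margin_for_prompt_suffix : Int := 512
  let in_context_ex_limit := prompt_limit - margin_for_prompt_suffix - max_query * 2
  let len_of_paragraph := PySem.Str.len "paragraph" + 1
  let len_of_tuples := PySem.Str.len "Corrected tuples:" + 1 + PySem.Str.len "Reference tuples:" + 1
  pvA_loop in_context_ex_limit len_of_paragraph len_of_tuples paragraphs 0 [] 0

-- ===== PORT B =====
-- the for-loop of B: state = (i, total)
def pvB_loop (limit : Int) (ps : List String) (i : Int) (total : Int) : Option Int :=
  match ps with
  | [] => none
  | p :: rest =>
    let total := total + 49 + 3 * PySem.Str.len p +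
      92 * (((PySem.Chars.splitOn p.toList ".".toList).length : Int) - 1)
    if total > limit then some i else pvB_loop limit rest (i + 1) total

def limit_paragrapgs_by_prompt_size_pred_delta_anderson_alt (paragraphs : List String) (prompt_limit : Int) (max_query : Int) : Option Int :=
  let limit := prompt_limit - 512 - max_query * 2
  pvB_loop limit paragraphs 1 0

-- ===== PRECONDITION & SPEC =====
def Spec_limit_paragrapgs_by_prompt_size_pred_delta_anderson (paragraphs : List String) (prompt_limit : Int) (max_query : Int) (out : Option Int) : Prop := out = limit_paragrapgs_by_prompt_size_pred_delta_anderson_alt paragraphs prompt_limit max_query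
instance (paragraphs : List String) (prompt_limit : Int) (max_query : Int) (out : Option Int) : Decidable (Spec_limit_paragrapgs_by_prompt_size_pred_delta_anderson paragraphs prompt_limit max_query out) := by unfold Spec_limit_paragrapgs_by_prompt_size_pred_delta_anderson; infer_instance

-- ===== CLAIM (what is proved, stated in full; the proofs are below) =====
def Claim_equal_limit_paragrapgs_by_prompt_size_pred_delta_anderson : Prop := ∀ (paragraphs : List String) (prompt_limit : Int) (max_query : Int), Dom_limit_paragrapgs_by_prompt_size_pred_delta_anderson paragraphs prompt_limit max_query → Spec_limit_paragrapgs_by_prompt_size_pred_delta_anderson paragraphs prompt_limit max_query (limit_paragrapgs_by_prompt_size_pred_delta_anderson paragraphs prompt_limit max_query)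

-- ===== LEMMAS AND PROOFS =====
lemma pv_flatten_intersperse_nil {α : Type} (l : List (List α)) :
    (List.intersperse ([] : List α) l).flatten = l.flatten := by
  induction l with
  | nil => rfl
  | cons a t ih => cases t <;> simp_all [List.intersperse]

-- ''.join(l ++ [s]) is exactly one entry longer than ''.join(l) by len(s)
lemma pv_len_join_snoc (l : List String) (s : String) :
    PySem.Str.len (PySem.Str.join "" (l ++ [s])) =
      PySem.Str.len (PySem.Str.join "" l) + PySem.Str.len s := by
  simp [PySem.Str.len, PySem.Str.toList_join, PySem.Chars.join, List.intercalate,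
    pv_flatten_intersperse_nil]

-- the in-context example built from paragraph p has length 49 + 3*len(p)
lemma pv_len_entry (p : String) :
    PySem.Str.len ("\nParagraph: " ++ p ++ "\nReference tuples: " ++ p ++
      "\nCorrected tuples:" ++ p) = 49 + 3 * PySem.Str.len p := by
  simp only [PySem.Str.len, String.toList_append, List.length_append]
  have h1 : ("\nParagraph: " : String).toList.length = 12 := by decide
  have h2 : ("\nReference tuples: " : String).toList.length = 19 := by decide
  have h3 : ("\nCorrected tuples:" : String).toList.length = 18 := by decide
  rw [h1, h2, h3]; push_cast; ring

lemma pv_loop_eq (ps : List String) (L : Int) (ix : Int) (ice : List String) (ov : Int) :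
    pvA_loop L 10 36 ps ix ice ov =
      pvB_loop L ps (ix + 1) (PySem.Str.len (PySem.Str.join "" ice) + ov) := by
  induction ps generalizing ix ice ov with
  | nil => rfl
  | cons p rest ih =>
    simp only [pvA_loop, pvB_loop]
    have he : PySem.Str.len (PySem.Str.join "" (ice ++ ["\nParagraph: " ++ p ++
          "\nReference tuples: " ++ p ++ "\nCorrected tuples:" ++ p])) +
        (ov + 2 * (((PySem.Chars.splitOn p.toList ".".toList).length : Int) - 1) * (10 + 36)) =
        PySem.Str.len (PySem.Str.join "" ice) + ov + 49 + 3 * PySem.Str.len p +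
          92 * (((PySem.Chars.splitOn p.toList ".".toList).length : Int) - 1) := by
      rw [pv_len_join_snoc, pv_len_entry]; ring
    rw [ih, he]

-- ===== VERDICT (by name: the statement is the Claim_ definition above) =====
theorem limit_paragrapgs_by_prompt_size_pred_delta_anderson_spec : Claim_equal_limit_paragrapgs_by_prompt_size_pred_delta_anderson := by
  intro paragraphs prompt_limit max_query _
  unfold Spec_limit_paragrapgs_by_prompt_size_pred_delta_anderson
  unfold limit_paragrapgs_by_prompt_size_pred_delta_anderson
  unfold limit_paragrapgs_by_prompt_size_pred_delta_anderson_alt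
  have h1 : PySem.Str.len "paragraph" + 1 = (10 : Int) := by decide
  have h2 : PySem.Str.len "Corrected tuples:" + 1 + PySem.Str.len "Reference tuples:" + 1 = (36 : Int) := by decide
  simp only [h1, h2]
  rw [pv_loop_eq]
  norm_num
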